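-- pv_equiv track=rewrite | github.com/Nahom-Derese/Competitive-Programing | Contests/A2SV/A2SV G5 - Contest #28/C_Benches.py | solve
-- ===== SOURCE A (Python) =====
-- def solve(n, m, nums):
--     ans = []
--     nums.sort()
--
--     mx, mi = nums[-1], nums[0]
--
--     # maximum calc
--     ans.append(mx + m)
--
--     # minimum calc
--     minimum_needed = sum([mx - num for num in nums])
--
--     if m <= minimum_needed:
--         ans.append(mx)
--         return ans[::-1]
--
--     m -= minimum_needed
--
--     q, r = divmod(m, n)
--
--     max_ans = mx + q
--     if r:
--         max_ans+=1
--
--     ans.append(max_ans)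
--
--     return ans[::-1]
-- ===== SOURCE B (Python) =====
-- def solve(n, m, nums):
--     mx = max(nums)
--     slack = sum(mx - a for a in nums)  # free seats below the current maximum level
--     if m <= slack:
--         return [mx, mx + m]
--     # binary search the smallest cap x >= mx under which the m newcomers fit
--     lo, hi = mx, mx + m
--     while lo < hi:
--         mid = (lo + hi) // 2
--         if n * (mid - mx) + slack >= m:
--             hi = mid
--         else:
--             lo = mid + 1
--     return [lo, mx + m]
-- ===== Notes on version B (the rewrite author's own statement) =====
-- stated objective: alternative
-- what changed: Replaces the sort + divmod closed-form derivation of the minimum by a binary search on the answer (smallest cap x >= mx with n*(x-mx)+slack >= m); no sorting, no divmod, no remainder correction.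
-- outside the precondition, e.g. on solve(-2, 5, [1, 1]): A returns [-1, 6], B returns [6, 6]
import Mathlib
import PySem

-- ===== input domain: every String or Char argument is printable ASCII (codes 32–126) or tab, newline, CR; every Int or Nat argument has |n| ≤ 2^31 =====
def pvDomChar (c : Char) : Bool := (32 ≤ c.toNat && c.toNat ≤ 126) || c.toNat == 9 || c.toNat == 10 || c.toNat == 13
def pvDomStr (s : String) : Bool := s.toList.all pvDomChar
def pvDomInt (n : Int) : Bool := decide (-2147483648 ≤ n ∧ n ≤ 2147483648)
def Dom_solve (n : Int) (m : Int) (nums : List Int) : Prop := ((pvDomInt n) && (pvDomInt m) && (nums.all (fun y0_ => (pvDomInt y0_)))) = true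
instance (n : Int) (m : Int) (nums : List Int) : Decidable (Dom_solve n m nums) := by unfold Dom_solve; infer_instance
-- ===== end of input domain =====

-- B finds the minimum by binary search on the answer instead of A's sort + divmod derivation
-- (alternative, same cost); A sorts `nums` in place while B leaves it untouched — the
-- equivalence proved here is about the RETURN value only.

-- ===== PORT A =====
def solve (n : Int) (m : Int) (nums : List Int) : List Int :=
  let s := PySem.List.sorted nums (fun x => x)      -- nums.sort()
  match PySem.List.pyGet? s (-1), PySem.List.pyGet? s 0 with   -- mx, mi = nums[-1], nums[0]
  | some mx, some _mi =>
    let ans : List Int := [mx + m]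
    let minimumNeeded := (s.map (fun num => mx - num)).sum
    if m ≤ minimumNeeded then
      match PySem.List.slice? (ans ++ [mx]) none none (-1) with   -- ans[::-1]
      | some r => r
      | none => []
    else
      let m2 := m - minimumNeeded
      match PySem.Int.divmod? m2 n with
      | some (q, r) =>
        let maxAns := mx + q
        let maxAns := if r ≠ 0 then maxAns + 1 else maxAns
        match PySem.List.slice? (ans ++ [maxAns]) none none (-1) with   -- ans[::-1]
        | some r' => r'
        | none => []
      | none => []     -- ZeroDivisionError (n = 0): outside Pre_
  | _, _ => []         -- IndexError on empty nums: outside Pre_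

-- ===== PORT B =====
-- the while-loop of Source B: binary search for the smallest cap x with n*(x-mx)+slack ≥ m.
-- `fuel` is only a termination guard: each iteration shrinks hi-lo by at least 1, so any
-- fuel ≥ (hi-lo).toNat makes this compute exactly what the Python while-loop computes.
def solveAltLoop (n : Int) (m : Int) (mx : Int) (slack : Int) : Nat → Int → Int → Int
  | 0, lo, _ => lo
  | fuel + 1, lo, hi =>
    if lo < hi then
      let mid := PySem.Int.floordiv (lo + hi) 2        -- (lo + hi) // 2
      if m ≤ n * (mid - mx) + slack then
        solveAltLoop n m mx slack fuel lo mid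
      else
        solveAltLoop n m mx slack fuel (mid + 1) hi
    else lo

def solve_alt (n : Int) (m : Int) (nums : List Int) : List Int :=
  match PySem.List.max? nums (fun x => x) with     -- mx = max(nums): ValueError on [], outside Pre_
  | none => []
  | some mx =>
    let slack := (nums.map (fun a => mx - a)).sum
    if m ≤ slack then [mx, mx + m]
    else [solveAltLoop n m mx slack (m.toNat) mx (mx + m), mx + m]   -- fuel: hi - lo = m iterations suffice

-- ===== PRECONDITION & SPEC =====
-- Pre_ excludes empty nums (A raises IndexError) and non-positive bench counts n whenever the
-- slack m exceeds the fill-up amount: there n = 0 makes A's divmod raise ZeroDivisionError, and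
-- a negative n is a malformed bench count outside the function's natural domain, on which A's
-- divmod yields a "minimum" below the maximum.
def Pre_solve (n : Int) (m : Int) (nums : List Int) : Prop :=
  nums ≠ [] ∧ ((nums.length : Int) * (nums.max?.getD 0) - nums.sum < m → 1 ≤ n)
instance (n : Int) (m : Int) (nums : List Int) : Decidable (Pre_solve n m nums) := by
  unfold Pre_solve; infer_instance
def pvWitness_solve : Int × Int × List Int := (2, 5, [1, 3])

def Spec_solve (n : Int) (m : Int) (nums : List Int) (out : List Int) : Prop := out = solve_alt n m nums
instance (n : Int) (m : Int) (nums : List Int) (out : List Int) : Decidable (Spec_solve n m nums out) := by unfold Spec_solve; infer_instance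

-- ===== CLAIM (what is proved, stated in full; the proofs are below) =====
def Claim_equal_solve : Prop := ∀ (n : Int) (m : Int) (nums : List Int), Dom_solve n m nums → Pre_solve n m nums → Spec_solve n m nums (solve n m nums)

-- ===== LEMMAS AND PROOFS =====

-- sum of (a - x) over a list
theorem pv_sum_map_sub (l : List Int) (a : Int) :
    (l.map (fun x => a - x)).sum = (l.length : Int) * a - l.sum := by
  induction l with
  | nil => simp
  | cons y t ih => simp [ih]; ring

-- the last element of sorted(nums) bounds every member of nums
theorem pv_sorted_last_max (nums : List Int) (L : Int)
    (hL : (PySem.List.sorted nums (fun x => x)).getLast? = some L) :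
    ∀ y ∈ nums, y ≤ L := by
  intro y hy
  have hmem : y ∈ PySem.List.sorted nums (fun x => x) :=
    (PySem.List.mem_sorted _ _ _ _).mpr hy
  obtain ⟨p, hp, hgp⟩ := List.mem_iff_getElem.mp hmem
  have hne : (PySem.List.sorted nums (fun x => x)) ≠ [] := by
    intro h; rw [h] at hL; simp at hL
  have hlen : 0 < (PySem.List.sorted nums (fun x => x)).length := List.length_pos_iff.mpr hne
  have hlast : (PySem.List.sorted nums (fun x => x)).getLast? =
      some (PySem.List.sorted nums (fun x => x))[(PySem.List.sorted nums (fun x => x)).length - 1] := by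
    rw [List.getLast?_eq_getElem?, List.getElem?_eq_getElem (by omega)]
  rw [hlast] at hL
  injection hL with hL'
  have hmono := PySem.List.sorted_id_getElem_mono nums
    (p := p) (q := (PySem.List.sorted nums (fun x => x)).length - 1) (by omega) (by omega)
  rw [hgp, hL'] at hmono
  exact hmono

-- the binary search returns the unique t with P t and ¬P y for all y < t, when lo ≤ t ≤ hi
theorem pv_loop_eq (n m mx slack : Int) (hn : 0 ≤ n) (t : Int)
    (hPt : m ≤ n * (t - mx) + slack)
    (hlow : ∀ y : Int, y < t → ¬ m ≤ n * (y - mx) + slack) :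
    ∀ (fuel : Nat) (lo hi : Int), (hi - lo).toNat ≤ fuel → lo ≤ t → t ≤ hi →
      solveAltLoop n m mx slack fuel lo hi = t := by
  intro fuel
  induction fuel with
  | zero =>
    intro lo hi hf hlt hth
    simp only [solveAltLoop]
    omega
  | succ k ih =>
    intro lo hi hf hlt hth
    by_cases h : lo < hi
    · have hm := PySem.Int.floordiv_mul_add_mod (lo + hi) 2
      have hr : PySem.Int.mod (lo + hi) 2 = (lo + hi) % 2 :=
        PySem.Int.mod_eq_emod_of_pos (by norm_num)
      have hmid : lo ≤ PySem.Int.floordiv (lo + hi) 2 ∧ PySem.Int.floordiv (lo + hi) 2 < hi := by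
        omega
      by_cases hP : m ≤ n * (PySem.Int.floordiv (lo + hi) 2 - mx) + slack
      · have htm : t ≤ PySem.Int.floordiv (lo + hi) 2 := by
          by_contra hc
          exact hlow _ (by omega) hP
        simp only [solveAltLoop, if_pos h, if_pos hP]
        exact ih lo _ (by omega) hlt htm
      · have htm : PySem.Int.floordiv (lo + hi) 2 + 1 ≤ t := by
          by_contra hc
          exact hP (hPt.trans (by nlinarith))
        simp only [solveAltLoop, if_pos h, if_neg hP]
        exact ih _ hi (by omega) htm hth
    · simp only [solveAltLoop, if_neg h]
      omega

-- ceiling identity q + (r ≠ 0) = -((-a) // n), positive divisor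
theorem pv_ceil_pos (a nn : Int) (h : 0 < nn) :
    PySem.Int.floordiv a nn + (if PySem.Int.mod a nn ≠ 0 then 1 else 0)
      = - PySem.Int.floordiv (-a) nn := by
  have hm := PySem.Int.floordiv_mul_add_mod a nn
  have hr : PySem.Int.mod a nn = a % nn := PySem.Int.mod_eq_emod_of_pos h
  have hr0 : 0 ≤ a % nn := Int.emod_nonneg a (by omega)
  have hrn : a % nn < nn := Int.emod_lt_of_pos a h
  refine ((PySem.Int.neg_floordiv_neg_eq_iff_of_pos h).mpr ?_).symm
  constructor <;> split_ifs with hc <;> ring_nf <;> rw [hr] at hm hc <;>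
    (try rw [not_ne_iff] at hc) <;>
    first
      | (have hlt : 0 < a % nn := lt_of_le_of_ne hr0 (Ne.symm hc); nlinarith)
      | nlinarith

-- ===== VERDICT (by name: the statement is the Claim_ definition above) =====
theorem solve_spec : Claim_equal_solve := by
  intro n m nums _hdom hpre
  obtain ⟨hne, hn1⟩ := hpre
  unfold Spec_solve
  have hsne : PySem.List.sorted nums (fun x => x) ≠ [] := by
    rw [Ne, PySem.List.sorted_eq_nil_iff]; exact hne
  have hslen : 0 < (PySem.List.sorted nums (fun x => x)).length := List.length_pos_iff.mpr hsne
  obtain ⟨L, hL⟩ := Option.isSome_iff_exists.mp (List.getLast?_isSome.mpr hsne)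
  have hh0 : (PySem.List.sorted nums (fun x => x))[0]? =
      some (PySem.List.sorted nums (fun x => x))[0] := List.getElem?_eq_getElem hslen
  obtain ⟨M, hM⟩ : ∃ M, PySem.List.max? nums (fun x => x) = some M := by
    cases h' : PySem.List.max? nums (fun x => x) with
    | none => exact absurd ((PySem.List.max?_eq_none_iff _ _).mp h') hne
    | some v => exact ⟨v, rfl⟩
  have hLM : L = M := by
    have hLmem : L ∈ nums :=
      (PySem.List.mem_sorted _ _ _ _).mp (List.mem_of_getLast? hL)
    have h1 : L ≤ M := PySem.List.max?_isMax hM L hLmem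
    have h2 : M ≤ L := pv_sorted_last_max nums L hL M (PySem.List.max?_mem hM)
    omega
  subst hLM
  have hperm := PySem.List.sorted_perm nums (fun x => x) false
  have hsum : (PySem.List.sorted nums (fun x => x)).sum = nums.sum := hperm.sum_eq
  have hlen : (PySem.List.sorted nums (fun x => x)).length = nums.length := hperm.length_eq
  have hneedA : ((PySem.List.sorted nums (fun x => x)).map (fun num => L - num)).sum
      = (nums.length : Int) * L - nums.sum := by
    rw [pv_sum_map_sub, hsum, hlen]
  have hneedB : (nums.map (fun a => L - a)).sum = (nums.length : Int) * L - nums.sum :=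
    pv_sum_map_sub nums L
  have hmax' : nums.max? = some L := List.max?_eq_some_iff.mpr
    ⟨PySem.List.max?_mem hM, fun b hb => PySem.List.max?_isMax hM b hb⟩
  have hslack0 : (0 : Int) ≤ (nums.length : Int) * L - nums.sum := by
    rw [← hneedB]
    exact List.sum_nonneg (by
      intro x hx
      obtain ⟨a, ha, rfl⟩ := List.mem_map.mp hx
      have := PySem.List.max?_isMax hM a ha
      omega)
  set need : Int := (nums.length : Int) * L - nums.sum with hneed_def
  simp only [solve, solve_alt, PySem.List.pyGet?_neg_one, PySem.List.pyGet?_zero, hL, hh0, hM]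
  rw [hneedA, hneedB]
  by_cases hcase : m ≤ need
  · simp [hcase, PySem.List.slice?_none_none_neg_one]
  · have hn : 1 ≤ n := hn1 (by simpa [hmax'] using lt_of_not_ge hcase)
    -- the ceiling c = -((need - m) // n), and A's branch value is L + c
    set d : Int := PySem.Int.floordiv (need - m) n with hd_def
    have hceil := pv_ceil_pos (m - need) n (by omega)
    have hnegneg : -(m - need) = need - m := by ring
    rw [hnegneg, ← hd_def] at hceil
    -- the loop returns L + (-d)
    have hm2 := PySem.Int.floordiv_mul_add_mod (need - m) n
    have hr2 : PySem.Int.mod (need - m) n = (need - m) % n :=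
      PySem.Int.mod_eq_emod_of_pos (by omega)
    rw [← hd_def, hr2] at hm2
    have hr0 : 0 ≤ (need - m) % n := Int.emod_nonneg _ (by omega)
    have hrn : (need - m) % n < n := Int.emod_lt_of_pos _ (by omega)
    have hx1 : (1 : Int) ≤ m - need := by omega
    have hPt : m ≤ n * (L + -d - L) + need := by nlinarith
    have hlow : ∀ y : Int, y < L + -d → ¬ m ≤ n * (y - L) + need := by
      intro y hy hc
      have h1 : y - L ≤ -d - 1 := by omega
      have h2 : n * (y - L) ≤ n * (-d - 1) := by nlinarith
      nlinarith
    have hcpos : 1 ≤ -d := by nlinarith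
    have hcle : -d ≤ m - need := by
      by_cases hc0 : -d ≤ 0
      · omega
      · nlinarith
    have hloop : solveAltLoop n m L need m.toNat L (L + m) = L + -d :=
      pv_loop_eq n m L need (by omega) (L + -d) hPt hlow m.toNat L (L + m) (by omega) (by omega) (by omega)
    simp only [if_neg hcase, PySem.Int.divmod?, if_neg (by omega : n ≠ 0),
      PySem.List.slice?_none_none_neg_one, List.reverse_cons,
      List.reverse_nil, List.nil_append, List.cons_append, hloop]
    simp only [PySem.Int.floordiv, PySem.Int.mod] at hceil ⊢
    split_ifs with hrz
    · rw [if_pos hrz] at hceil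
      simp only [List.cons.injEq, and_true]
      omega
    · rw [if_neg hrz] at hceil
      simp only [List.cons.injEq, and_true]
      omega
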